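-- pv_equiv track=rewrite | github.com/GrgAakash/grgaakash.github.io | Codes_QTCat/qdv_reduce.py | reduce_qdv_to_reduced_dyck
-- ===== SOURCE A (Python) =====
-- from typing import List, Sequence
--
-- def reduce_qdv_to_reduced_dyck(qdv: Sequence[int]) -> List[int]:
--     """
--     Reduce a Quasi-Dyck vector (QDV) to its reduced Dyck vector representative.
--
--     Algorithm:
--     1) Lift until non-negative: while any entry is negative, map v -> [0] + (v + 1).
--     2) Shorten while safe: while v starts with 0 and (v without first 0) - 1 stays non-negative,
--        replace v with that candidate.
--
--     Args:
--         qdv: Input sequence of integers representing a QDV.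
--
--     Returns:
--         A list of integers representing the reduced Dyck vector.
--     """
--     if not qdv:
--         return [0]
--
--     v: List[int] = list(qdv)
--
--     # Lift to Dyck (remove negatives) by adding 0 in front and +1 to all entries
--     while any(x < 0 for x in v):
--         v = [0] + [x + 1 for x in v]
--
--     # Reduce length while possible without introducing negatives
--     while len(v) > 1 and v[0] == 0:
--         candidate = [x - 1 for x in v[1:]]
--         if all(x >= 0 for x in candidate):
--             v = candidate
--         else:
--             break
--
--     return v
-- ===== SOURCE B (Python) =====
-- from typing import List, Sequence
--
-- def reduce_qdv_to_reduced_dyck(qdv: Sequence[int]) -> List[int]: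
--     # Closed-form lift + single-pass suffix-minima peel; O(n+k) vs A's O((n+k)^2).
--     if not qdv:
--         return [0]
--     k = -min(min(qdv), 0)
--     w = list(range(k)) + [x + k for x in qdv]
--     n = len(w)
--     # smin[i] = min(w[i:])
--     smin = [0] * n
--     m = w[-1]
--     for i in range(n - 1, -1, -1):
--         m = min(m, w[i])
--         smin[i] = m
--     t = 0
--     while t < n - 1 and w[t] == t and smin[t + 1] >= t + 1:
--         t += 1
--     return [x - t for x in w[t:]]
-- ===== Notes on version B (the rewrite author's own statement) =====
-- stated objective: faster
-- what changed: Replaces A's two whole-list-rebuilding while loops (repeated [0]+v+1 lifting and repeated peel-and-shift passes) by a closed-form lift (prepend range(k), add k, with k = -min(min(v),0)) and a single suffix-minima pass plus one scan that computes the peel count t, emitting w[t:]-t once.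
import Mathlib
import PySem

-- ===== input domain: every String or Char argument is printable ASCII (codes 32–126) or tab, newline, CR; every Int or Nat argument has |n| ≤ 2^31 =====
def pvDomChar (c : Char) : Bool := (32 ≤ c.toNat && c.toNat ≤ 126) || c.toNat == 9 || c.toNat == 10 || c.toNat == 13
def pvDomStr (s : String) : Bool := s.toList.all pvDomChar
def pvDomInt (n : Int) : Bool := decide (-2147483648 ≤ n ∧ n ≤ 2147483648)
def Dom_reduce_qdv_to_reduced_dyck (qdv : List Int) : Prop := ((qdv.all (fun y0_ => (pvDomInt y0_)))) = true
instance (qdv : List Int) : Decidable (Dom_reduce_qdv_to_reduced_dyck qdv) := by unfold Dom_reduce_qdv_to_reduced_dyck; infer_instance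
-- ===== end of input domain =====

-- B replaces A's repeated whole-list rebuilding (O((n+k)^2)) by a closed-form lift and a
-- single suffix-minima pass plus one peel-count scan (O(n+k)); same return value everywhere.

-- ===== PORT A =====

-- termination helper for the lift loop: adding 1 to every entry strictly shrinks total negativity
theorem pvLiftMeasure_lt (v : List Int) (h : v.any (fun x => decide (x < 0)) = true) :
    ((v.map (fun x => x + 1)).map (fun x => (-x).toNat)).sum < (v.map (fun x => (-x).toNat)).sum := by
  induction v with
  | nil => simp at h
  | cons a t ih =>
    simp only [List.any_cons, Bool.or_eq_true, decide_eq_true_eq] at h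
    rcases h with h | h
    · have ht : ((t.map (fun x => x + 1)).map (fun x => (-x).toNat)).sum ≤
          (t.map (fun x => (-x).toNat)).sum := by
        simp only [List.map_map]
        apply List.sum_le_sum
        intro i _
        simp only [Function.comp_apply]
        omega
      simp only [List.map_cons, List.sum_cons]
      omega
    · have := ih h
      simp only [List.map_cons, List.sum_cons]
      omega

-- Phase 1 of A: `while any(x < 0 for x in v): v = [0] + [x + 1 for x in v]`
def pvLiftLoop (v : List Int) : List Int :=
  if v.any (fun x => decide (x < 0)) then
    pvLiftLoop ((0 : Int) :: v.map (fun x => x + 1))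
  else v
termination_by (v.map (fun x => (-x).toNat)).sum
decreasing_by
  rename_i h
  have hx : v.attach.map (fun x => x.1 + 1) = v.map (fun x => x + 1) := by
    simp
  simp only [List.map_cons, List.sum_cons]
  rw [hx]
  have := pvLiftMeasure_lt v h
  omega

-- Phase 2 of A: `while len(v) > 1 and v[0] == 0: candidate = …; if all(…): v = candidate else break`
def pvPeelLoop (v : List Int) : List Int :=
  if h : 1 < v.length ∧ PySem.List.pyGetD v 0 0 = 0 then  -- v[0]: in range (guard gives len > 1)
    let candidate := (PySem.List.slice v (some 1) none).map (fun x => x - 1)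
    if candidate.all (fun x => decide (0 ≤ x)) then pvPeelLoop candidate else v
  else v
termination_by v.length
decreasing_by
  simp only [List.length_map, PySem.List.slice_from_one, List.length_tail]
  omega

def reduce_qdv_to_reduced_dyck (qdv : List Int) : List Int :=
  if qdv = [] then [0]
  else pvPeelLoop (pvLiftLoop qdv)

-- ===== PORT B =====

-- smin[i] = min(w[i:]), built in one pass from the right (B's reverse index loop)
def pvSufMins : List Int → List Int
  | [] => []
  | x :: xs =>
    let r := pvSufMins xs
    min x (r.headD x) :: r

-- B's `while t < n - 1 and w[t] == t and smin[t + 1] >= t + 1: t += 1`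
def pvScanT (w smin : List Int) (t : Nat) : Nat :=
  if t + 1 < w.length ∧ PySem.List.pyGetD w (t : Int) 0 = (t : Int) ∧
      (t : Int) + 1 ≤ PySem.List.pyGetD smin ((t : Int) + 1) 0 then
    pvScanT w smin (t + 1)
  else t
termination_by w.length - t
decreasing_by omega

def reduce_qdv_to_reduced_dyck_alt (qdv : List Int) : List Int :=
  if qdv = [] then [0]
  else
    let m := (PySem.List.min? qdv (fun x => x)).getD 0   -- min(qdv): qdv nonempty here
    let k : Nat := (-(min m 0)).toNat
    let w := PySem.List.pyRange 0 (k : Int) 1 ++ qdv.map (fun x => x + (k : Int))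
    let t := pvScanT w (pvSufMins w) 0
    (PySem.List.slice w (some (t : Int)) none).map (fun x => x - (t : Int))

-- ===== PRECONDITION & SPEC =====
def Spec_reduce_qdv_to_reduced_dyck (qdv : List Int) (out : List Int) : Prop := out = reduce_qdv_to_reduced_dyck_alt qdv
instance (qdv : List Int) (out : List Int) : Decidable (Spec_reduce_qdv_to_reduced_dyck qdv out) := by unfold Spec_reduce_qdv_to_reduced_dyck; infer_instance

-- ===== CLAIM (what is proved, stated in full; the proofs are below) =====
def Claim_equal_reduce_qdv_to_reduced_dyck : Prop := ∀ (qdv : List Int), Dom_reduce_qdv_to_reduced_dyck qdv → Spec_reduce_qdv_to_reduced_dyck qdv (reduce_qdv_to_reduced_dyck qdv)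

-- ===== LEMMAS AND PROOFS =====

-- A's lift loop in closed form: prepend 0,1,…,k-1 and add k, where -k bounds v from below
theorem pvLift_closed (k : Nat) : ∀ (v : List Int),
    (∀ x ∈ v, -(k : Int) ≤ x) → (0 < k → ∃ x ∈ v, x ≤ -(k : Int)) →
    pvLiftLoop v = (List.range k).map (fun (i : Nat) => (i : Int)) ++ v.map (fun x => x + (k : Int)) := by
  induction k with
  | zero =>
    intro v hlb _
    have hany : v.any (fun x => decide (x < 0)) = false := by
      simp only [List.any_eq_false, decide_eq_true_eq, not_lt]
      intro x hx
      have := hlb x hx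
      omega
    rw [pvLiftLoop, hany]
    simp
  | succ j ih =>
    intro v hlb hat
    obtain ⟨x, hxv, hxle⟩ := hat (Nat.succ_pos j)
    have hx0 : x < 0 := by push_cast at hxle; omega
    have hany : v.any (fun x => decide (x < 0)) = true :=
      List.any_eq_true.2 ⟨x, hxv, by simpa using hx0⟩
    rw [pvLiftLoop, hany, if_pos rfl]
    rw [ih]
    · rw [List.range_succ]
      simp only [List.map_append, List.map_cons, List.map_map, List.map_nil, Function.comp_def,
        List.append_assoc, List.cons_append, List.nil_append, zero_add]
      congr 1
      rw [show (fun (x : Int) => x + 1 + (j : Int)) = (fun x => x + (((j : Nat) + 1 : Nat) : Int)) from by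
        funext y; push_cast; ring]
    · intro y hy
      rcases List.mem_cons.1 hy with h | h
      · omega
      · obtain ⟨z, hz, rfl⟩ := List.mem_map.1 h
        have := hlb z hz
        push_cast at this ⊢
        omega
    · intro hj
      refine ⟨x + 1, List.mem_cons_of_mem _ (List.mem_map.2 ⟨x, hxv, rfl⟩), ?_⟩
      push_cast at hxle ⊢
      omega

-- suffix-minima characterisation
theorem pvSufMins_ge_iff (w : List Int) : ∀ (i : Nat) (c : Int), i < w.length →
    (c ≤ (pvSufMins w).getD i 0 ↔ ∀ y ∈ w.drop i, c ≤ y) := by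
  induction w with
  | nil => intro i c h; simp at h
  | cons x xs ih =>
    intro i c h
    cases i with
    | zero =>
      cases xs with
      | nil => simp [pvSufMins]
      | cons y ys =>
        have hstep : pvSufMins (x :: y :: ys) =
            min x ((pvSufMins (y :: ys)).headD x) :: pvSufMins (y :: ys) := rfl
        obtain ⟨m, ms, hm⟩ := List.exists_cons_of_ne_nil
          (show pvSufMins (y :: ys) ≠ [] by simp [pvSufMins])
        have h0 : (pvSufMins (y :: ys)).headD x = (pvSufMins (y :: ys)).getD 0 0 := by
          rw [hm]; rfl
        rw [hstep, List.getD_cons_zero, List.drop_zero, h0, le_min_iff, ih 0 c (by simp)]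
        simp only [List.drop_zero]
        constructor
        · rintro ⟨h1, h2⟩ z hz
          rcases List.mem_cons.1 hz with rfl | hz'
          · exact h1
          · exact h2 z hz'
        · intro hall
          exact ⟨hall x (List.mem_cons_self), fun z hz => hall z (List.mem_cons_of_mem _ hz)⟩
    | succ j =>
      have : (pvSufMins (x :: xs)).getD (j + 1) 0 = (pvSufMins xs).getD j 0 := by
        simp [pvSufMins]
      rw [this, List.drop_succ_cons]
      exact ih j c (by simpa using h)

-- A's peel loop equals B's scan: invariant "current A-state = (w.drop t) - t"
theorem pvPeel_scan (w : List Int) : ∀ (n t : Nat), w.length - t ≤ n → t < w.length →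
    pvPeelLoop ((w.drop t).map (fun x => x - (t : Int))) =
      (w.drop (pvScanT w (pvSufMins w) t)).map (fun x => x - ((pvScanT w (pvSufMins w) t : Nat) : Int)) := by
  intro n
  induction n with
  | zero => intro t h1 h2; omega
  | succ m ih =>
    intro t h1 h2
    have hdrop : w.drop t = w[t] :: w.drop (t + 1) := List.drop_eq_getElem_cons h2
    have hvlen : ((w.drop t).map (fun x => x - (t : Int))).length = w.length - t := by simp
    have hget : PySem.List.pyGetD w (t : Int) 0 = w[t] := by
      rw [PySem.List.pyGetD_natCast, List.getD_eq_getElem w 0 h2]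
    have hv0 : PySem.List.pyGetD ((w.drop t).map (fun x => x - (t : Int))) 0 0 = w[t] - (t : Int) := by
      rw [show (0 : Int) = ((0 : Nat) : Int) from rfl, PySem.List.pyGetD_natCast, hdrop]
      simp [List.getElem?_eq_getElem h2]
    by_cases hc1 : t + 1 < w.length
    · by_cases hc2 : w[t] = (t : Int)
      · -- head matches: both loops test the peel-safety condition
        have hsm : PySem.List.pyGetD (pvSufMins w) ((t : Int) + 1) 0 = (pvSufMins w).getD (t + 1) 0 := by
          rw [show ((t : Int) + 1) = ((t + 1 : Nat) : Int) by push_cast; ring, PySem.List.pyGetD_natCast]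
        have hcand : ((PySem.List.slice ((w.drop t).map (fun x => x - (t : Int))) (some 1) none).map
              (fun x => x - 1)) = (w.drop (t + 1)).map (fun x => x - ((t + 1 : Nat) : Int)) := by
          rw [PySem.List.slice_from_one, hdrop]
          simp only [List.map_cons, List.tail_cons, List.map_map]
          apply List.map_congr_left
          intro y _
          simp only [Function.comp_apply]
          push_cast
          ring
        have hcond : (((PySem.List.slice ((w.drop t).map (fun x => x - (t : Int))) (some 1) none).map
              (fun x => x - 1)).all (fun x => decide (0 ≤ x)) = true)
            ↔ ((t : Int) + 1 ≤ PySem.List.pyGetD (pvSufMins w) ((t : Int) + 1) 0) := by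
          rw [hcand, hsm, pvSufMins_ge_iff w (t + 1) ((t : Int) + 1) hc1]
          simp only [List.all_eq_true, List.mem_map, decide_eq_true_eq]
          constructor
          · intro hall y hy
            have := hall _ ⟨y, hy, rfl⟩
            push_cast at this ⊢
            omega
          · rintro hall _ ⟨y, hy, rfl⟩
            have := hall y hy
            push_cast
            omega
        by_cases hc3 : (((PySem.List.slice ((w.drop t).map (fun x => x - (t : Int))) (some 1) none).map
              (fun x => x - 1)).all (fun x => decide (0 ≤ x)) = true)
        · -- peel one step on both sides, then the induction hypothesis
          rw [pvPeelLoop, dif_pos ⟨by omega, by rw [hv0, hc2]; ring⟩]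
          simp only []
          rw [if_pos hc3, hcand]
          rw [pvScanT, if_pos ⟨hc1, by rw [hget, hc2], hcond.1 hc3⟩]
          exact ih (t + 1) (by omega) hc1
        · -- candidate would go negative: both loops stop at t
          rw [pvPeelLoop, dif_pos ⟨by omega, by rw [hv0, hc2]; ring⟩]
          simp only []
          rw [if_neg hc3]
          rw [pvScanT, if_neg (by intro hco; exact hc3 (hcond.2 hco.2.2))]
      · -- head mismatch: both loops stop at t
        rw [pvPeelLoop, dif_neg (by rintro ⟨-, hh⟩; rw [hv0] at hh; exact hc2 (by omega))]
        rw [pvScanT, if_neg (by rintro ⟨-, hh, -⟩; rw [hget] at hh; exact hc2 hh)]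
      -- (no third case)
    · -- fewer than two elements remain: both loops stop at t
      rw [pvPeelLoop, dif_neg (by rintro ⟨hl, -⟩; rw [hvlen] at hl; omega)]
      rw [pvScanT, if_neg (by rintro ⟨hl, -⟩; omega)]

-- ===== VERDICT (by name: the statement is the Claim_ definition above) =====
theorem reduce_qdv_to_reduced_dyck_spec : Claim_equal_reduce_qdv_to_reduced_dyck := by
  intro qdv _
  show reduce_qdv_to_reduced_dyck qdv = reduce_qdv_to_reduced_dyck_alt qdv
  by_cases hq : qdv = []
  · simp [reduce_qdv_to_reduced_dyck, reduce_qdv_to_reduced_dyck_alt, hq]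
  · rw [reduce_qdv_to_reduced_dyck, reduce_qdv_to_reduced_dyck_alt, if_neg hq, if_neg hq]
    cases hmin : PySem.List.min? qdv (fun x => x) with
    | none => exact absurd ((PySem.List.min?_eq_none_iff _ _).1 hmin) hq
    | some m0 =>
      simp only [Option.getD_some]
      have hle := PySem.List.min?_id_le hmin
      have hmem := PySem.List.min?_mem hmin
      set k : Nat := (-(min m0 0)).toNat with hkdef
      have hk : (k : Int) = -(min m0 0) := by
        have := min_le_right m0 0
        simp only [hkdef]
        omega
      have hw : PySem.List.pyRange 0 (k : Int) 1 = (List.range k).map (fun (i : Nat) => (i : Int)) :=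
        PySem.List.pyRange_zero_natCast k
      have hlift : pvLiftLoop qdv =
          PySem.List.pyRange 0 (k : Int) 1 ++ qdv.map (fun x => x + (k : Int)) := by
        rw [hw]
        apply pvLift_closed
        · intro x hx
          have h1 := hle x hx
          have h2 := min_le_left m0 0
          omega
        · intro hkpos
          refine ⟨m0, hmem, ?_⟩
          have : min m0 0 < 0 := by omega
          have : min m0 0 = m0 := by omega
          omega
      rw [hlift]
      set w := PySem.List.pyRange 0 (k : Int) 1 ++ qdv.map (fun x => x + (k : Int)) with hwdef
      have hw0 : 0 < w.length := by
        have : qdv.length ≠ 0 := fun h => hq (List.eq_nil_of_length_eq_zero h)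
        simp [hwdef]
        omega
      have hmain := pvPeel_scan w w.length 0 (by omega) hw0
      simp only [List.drop_zero, Nat.cast_zero, sub_zero, List.map_id'] at hmain
      rw [PySem.List.slice_from_natCast]
      exact hmain
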